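-- pv_equiv track=rewrite | github.com/dangpnh2/htv | model.py | get_level_nodes
-- ===== SOURCE A (Python) =====
-- from collections import defaultdict
--
-- def get_level_nodes(tree_depth, max_lvl):
--     level_nodes = defaultdict(list)
--     for level in range(max_lvl):
--         for key, value in tree_depth.items():
--             if value == level+1:
--                 level_nodes[level].append(key)
--     level_nodes = dict(level_nodes)
--     return level_nodes
-- ===== SOURCE B (Python) =====
-- def get_level_nodes(tree_depth, max_lvl):
--     buckets = {}
--     for key, value in tree_depth.items():
--         if 1 <= value <= max_lvl:
--             buckets.setdefault(value - 1, []).append(key)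
--     return {lvl: buckets[lvl] for lvl in sorted(buckets)}
-- ===== Notes on version B (the rewrite author's own statement) =====
-- stated objective: faster
-- what changed: A rescans every item once per level of range(max_lvl); B makes one pass over the items, bucketing each key into a dict keyed by level, then emits the buckets in sorted-key order.
import Mathlib
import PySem

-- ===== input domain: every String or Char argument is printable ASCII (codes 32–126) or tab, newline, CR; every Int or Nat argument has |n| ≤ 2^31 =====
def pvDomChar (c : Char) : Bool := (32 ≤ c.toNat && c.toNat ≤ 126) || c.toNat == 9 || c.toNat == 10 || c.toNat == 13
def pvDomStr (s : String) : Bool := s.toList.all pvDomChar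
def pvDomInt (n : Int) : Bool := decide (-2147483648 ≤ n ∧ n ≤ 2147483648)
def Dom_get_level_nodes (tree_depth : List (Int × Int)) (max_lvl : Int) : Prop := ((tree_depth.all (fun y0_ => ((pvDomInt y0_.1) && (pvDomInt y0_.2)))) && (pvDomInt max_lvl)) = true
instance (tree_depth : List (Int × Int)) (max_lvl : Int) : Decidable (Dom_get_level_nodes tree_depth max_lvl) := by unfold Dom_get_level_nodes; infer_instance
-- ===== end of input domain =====

-- B replaces A's per-level rescans of all items by a single pass that buckets each key
-- into a dict keyed by its level, followed by one sort of the occupied levels (faster).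

-- ===== PORT A =====
-- for level in range(max_lvl): for key, value in items: if value == level+1: level_nodes[level].append(key)
-- (defaultdict(list): level_nodes[level].append(key) is d.modify level [] (· ++ [key]))
def get_level_nodes (tree_depth : List (Int × Int)) (max_lvl : Int) : List (Int × List Int) :=
  ((PySem.List.pyRange 0 max_lvl 1).foldl
    (fun d level => tree_depth.foldl
      (fun d p => if p.2 == level + 1 then d.modify level ([] : List Int) (fun xs => xs ++ [p.1]) else d) d)
    PySem.Dict.empty).items

-- ===== PORT B =====
-- the bucketing step: if 1 <= value <= max_lvl: buckets.setdefault(value-1, []).append(key)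
def stepB (m : Int) (d : PySem.Dict Int (List Int)) (p : Int × Int) : PySem.Dict Int (List Int) :=
  if decide (1 ≤ p.2) && decide (p.2 ≤ m)
    then d.modify (p.2 - 1) ([] : List Int) (fun xs => xs ++ [p.1]) else d

-- buckets = {}; for key, value in items: if 1 <= value <= max_lvl: buckets.setdefault(value-1, []).append(key)
-- (setdefault(k, []).append(key) is d.modify k [] (· ++ [key]))
-- return {lvl: buckets[lvl] for lvl in sorted(buckets)}
def get_level_nodes_alt (tree_depth : List (Int × Int)) (max_lvl : Int) : List (Int × List Int) :=
  let buckets := tree_depth.foldl (stepB max_lvl) (PySem.Dict.empty : PySem.Dict Int (List Int))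
  (PySem.List.sorted buckets.keys (fun x => x) false).map
    (fun lvl => (lvl, buckets.getD lvl []))

-- ===== PRECONDITION & SPEC =====
def Spec_get_level_nodes (tree_depth : List (Int × Int)) (max_lvl : Int) (out : List (Int × List Int)) : Prop := out = get_level_nodes_alt tree_depth max_lvl
instance (tree_depth : List (Int × Int)) (max_lvl : Int) (out : List (Int × List Int)) : Decidable (Spec_get_level_nodes tree_depth max_lvl out) := by unfold Spec_get_level_nodes; infer_instance

-- ===== CLAIM (what is proved, stated in full; the proofs are below) =====
def Claim_equal_get_level_nodes : Prop := ∀ (tree_depth : List (Int × Int)) (max_lvl : Int), Dom_get_level_nodes tree_depth max_lvl → Spec_get_level_nodes tree_depth max_lvl (get_level_nodes tree_depth max_lvl)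

-- ===== LEMMAS AND PROOFS =====

-- keys collected at one level
def kAt (td : List (Int × Int)) (l : Int) : List Int :=
  (td.filter (fun p => p.2 == l + 1)).map (fun p => p.1)

-- A's inner loop over the items at a fixed level
def innerF (td : List (Int × Int)) (lvl : Int) (d : PySem.Dict Int (List Int)) : PySem.Dict Int (List Int) :=
  td.foldl (fun d p => if p.2 == lvl + 1 then d.modify lvl ([] : List Int) (fun xs => xs ++ [p.1]) else d) d

theorem kAt_cons_match (p : Int × Int) (td : List (Int × Int)) (l : Int) (h : p.2 = l + 1) :
    kAt (p :: td) l = p.1 :: kAt td l := by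
  simp [kAt, h]

theorem kAt_cons_nomatch (p : Int × Int) (td : List (Int × Int)) (l : Int) (h : ¬ p.2 = l + 1) :
    kAt (p :: td) l = kAt td l := by
  simp [kAt, h]

-- inner loop when the level is already present with value xs
theorem inner_present (td : List (Int × Int)) (lvl : Int) (d : PySem.Dict Int (List Int))
    (xs : List Int) (hget : d.get? lvl = some xs) (hnd : d.keys.Nodup) :
    (innerF td lvl d).items =
      d.items.map (fun q => if q.1 == lvl then (lvl, xs ++ kAt td lvl) else q) := by
  induction td generalizing d xs with
  | nil =>
    simp only [innerF, List.foldl_nil, kAt, List.filter_nil, List.map_nil, List.append_nil]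
    refine Eq.symm (Eq.trans (List.map_congr_left ?_) (List.map_id d.items))
    rintro ⟨k0, v0⟩ hq
    by_cases hk : k0 = lvl
    · subst hk
      have hv := PySem.Dict.get?_of_mem_items d hq hnd
      rw [hget] at hv
      have hv2 : v0 = xs := by injection hv with h; exact h.symm
      simp [hv2]
    · simp [hk]
  | cons p rest ih =>
    by_cases hp : p.2 = lvl + 1
    · have hd : d.getD lvl [] = xs := by
        rw [PySem.Dict.getD_eq_get?_getD, hget]; rfl
      have hstep : innerF (p :: rest) lvl d = innerF rest lvl (d.insert lvl (xs ++ [p.1])) := by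
        simp [innerF, hp, PySem.Dict.modify, hd]
      rw [hstep, ih (d.insert lvl (xs ++ [p.1])) (xs ++ [p.1])
            (PySem.Dict.get?_insert_self d lvl (xs ++ [p.1]))
            (PySem.Dict.nodup_keys_insert d lvl (xs ++ [p.1]) hnd)]
      rw [PySem.Dict.items_insert_of_contains d _
            (by rw [PySem.Dict.contains_eq_isSome_get?, hget]; rfl)]
      rw [List.map_map, kAt_cons_match p rest lvl hp]
      refine List.map_congr_left ?_
      intro q _
      by_cases hk : q.1 = lvl <;> simp [hk]
    · have hstep : innerF (p :: rest) lvl d = innerF rest lvl d := by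
        simp [innerF, hp]
      rw [hstep, ih d xs hget hnd, kAt_cons_nomatch p rest lvl hp]

-- inner loop when the level is absent
theorem inner_absent (td : List (Int × Int)) (lvl : Int) (d : PySem.Dict Int (List Int))
    (hc : d.contains lvl = false) (hnd : d.keys.Nodup) :
    (innerF td lvl d).items =
      d.items ++ (if kAt td lvl = [] then [] else [(lvl, kAt td lvl)]) := by
  induction td generalizing d with
  | nil => simp [innerF, kAt]
  | cons p rest ih =>
    by_cases hp : p.2 = lvl + 1
    · have hd : d.getD lvl [] = [] := by
        have hget : d.get? lvl = none := by
          rw [PySem.Dict.get?_eq_none_iff_contains]; simp [hc]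
        rw [PySem.Dict.getD_eq_get?_getD, hget]; rfl
      have hstep : innerF (p :: rest) lvl d = innerF rest lvl (d.insert lvl [p.1]) := by
        simp [innerF, hp, PySem.Dict.modify, hd]
      rw [hstep, inner_present rest lvl _ [p.1]
            (PySem.Dict.get?_insert_self d lvl [p.1])
            (PySem.Dict.nodup_keys_insert d lvl [p.1] hnd)]
      rw [PySem.Dict.items_insert_of_not_contains d _ hc]
      rw [List.map_append, kAt_cons_match p rest lvl hp]
      have hkey : ∀ q ∈ d.items, q.1 ≠ lvl := by
        intro q hq heq
        have hm : lvl ∈ d.keys := by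
          simp only [PySem.Dict.keys]
          exact List.mem_map.mpr ⟨q, hq, heq⟩
        rw [← PySem.Dict.contains_iff_mem_keys] at hm
        simp_all
      have h1 : d.items.map (fun q => if q.1 == lvl then (lvl, [p.1] ++ kAt rest lvl) else q) = d.items := by
        refine Eq.trans (List.map_congr_left ?_) (List.map_id d.items)
        intro q hq
        simp [hkey q hq]
      rw [h1]
      simp
    · have hstep : innerF (p :: rest) lvl d = innerF rest lvl d := by
        simp [innerF, hp]
      rw [hstep, ih d hc hnd, kAt_cons_nomatch p rest lvl hp]

theorem outer_fold (td : List (Int × Int)) (L : List Int) (d : PySem.Dict Int (List Int))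
    (hL : L.Nodup) (hnd : d.keys.Nodup) (hfresh : ∀ l ∈ L, d.contains l = false) :
    (L.foldl (fun d lvl => innerF td lvl d) d).items =
      d.items ++ L.filterMap (fun l => if kAt td l = [] then none else some (l, kAt td l)) := by
  induction L generalizing d with
  | nil => simp
  | cons lvl L' ih =>
    have hc : d.contains lvl = false := hfresh lvl (by simp)
    have hitems := inner_absent td lvl d hc hnd
    have hkeys : (innerF td lvl d).keys = d.keys ++ (if kAt td lvl = [] then [] else [lvl]) := by
      simp only [PySem.Dict.keys, hitems, List.map_append]
      split <;> simp
    have hnotmem : lvl ∉ d.keys := by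
      rw [← PySem.Dict.contains_iff_mem_keys, hc]; simp
    have hnd' : (innerF td lvl d).keys.Nodup := by
      rw [hkeys]
      split
      · simpa using hnd
      · simp only [List.nodup_append, List.nodup_cons, List.nodup_nil]
        refine ⟨hnd, by simp, ?_⟩
        intro a ha b hb
        rw [List.mem_singleton] at hb
        subst hb
        intro h
        subst h
        exact hnotmem ha
    have hfresh' : ∀ l ∈ L', (innerF td lvl d).contains l = false := by
      intro l hl
      rw [PySem.Dict.contains_eq_decide_mem_keys, hkeys]
      have h1 : l ∉ d.keys := by
        rw [← PySem.Dict.contains_iff_mem_keys, hfresh l (by simp [hl])]; simp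
      have h2 : l ≠ lvl := by
        intro h; exact (List.nodup_cons.mp hL).1 (h ▸ hl)
      split <;> simp [h1, h2]
    rw [List.foldl_cons, ih _ (List.nodup_cons.mp hL).2 hnd' hfresh', hitems]
    simp only [List.filterMap_cons]
    split <;> simp

theorem filterMap_eq_map_filter (xs : List Int) (k : Int → List Int) :
    xs.filterMap (fun l => if k l = [] then none else some (l, k l)) =
      (xs.filter (fun l => !decide (k l = []))).map (fun l => (l, k l)) := by
  induction xs with
  | nil => rfl
  | cons x t ih =>
    by_cases h : k x = [] <;> simp [h, ih]

-- B-side: the bucket fold's entry at level l is d's entry extended by kAt td l (when in range)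
theorem bucket_getD (td : List (Int × Int)) (m : Int) (l : Int) (d : PySem.Dict Int (List Int)) :
    (td.foldl (stepB m) d).getD l [] =
      d.getD l [] ++ (if 0 ≤ l ∧ l < m then kAt td l else []) := by
  induction td generalizing d with
  | nil => simp [kAt]
  | cons p rest ih =>
    by_cases hin : 1 ≤ p.2 ∧ p.2 ≤ m
    · have hstep : (p :: rest).foldl (stepB m) d =
          rest.foldl (stepB m) (d.modify (p.2 - 1) [] (fun xs => xs ++ [p.1])) := by
        simp [stepB, hin.1, hin.2]
      rw [hstep, ih]
      by_cases hl : l = p.2 - 1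
      · subst hl
        have hrange : 0 ≤ p.2 - 1 ∧ p.2 - 1 < m := ⟨by omega, by omega⟩
        rw [PySem.Dict.getD_modify_self,
            kAt_cons_match p rest (p.2 - 1) (by omega)]
        simp [hrange, hin.1, List.append_assoc]
      · rw [PySem.Dict.getD_modify, if_neg hl]
        by_cases hr : 0 ≤ l ∧ l < m
        · rw [kAt_cons_nomatch p rest l (by omega)]
        · simp [hr]
    · have hstep : (p :: rest).foldl (stepB m) d = rest.foldl (stepB m) d := by
        have : (decide (1 ≤ p.2) && decide (p.2 ≤ m)) = false := by
          simp only [Bool.and_eq_false_iff, decide_eq_false_iff_not]; omega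
        simp [stepB, this]
      rw [hstep, ih]
      by_cases hr : 0 ≤ l ∧ l < m
      · rw [kAt_cons_nomatch p rest l (by omega)]
      · simp [hr]

-- B-side: which levels the bucket dict contains
theorem bucket_mem_keys (td : List (Int × Int)) (m : Int) (l : Int) (d : PySem.Dict Int (List Int)) :
    l ∈ (td.foldl (stepB m) d).keys ↔ l ∈ d.keys ∨ (0 ≤ l ∧ l < m ∧ ∃ p ∈ td, p.2 = l + 1) := by
  induction td generalizing d with
  | nil => simp
  | cons p rest ih =>
    by_cases hin : 1 ≤ p.2 ∧ p.2 ≤ m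
    · have hstep : (p :: rest).foldl (stepB m) d =
          rest.foldl (stepB m) (d.modify (p.2 - 1) [] (fun xs => xs ++ [p.1])) := by
        simp [stepB, hin.1, hin.2]
      rw [hstep, ih]
      simp only [PySem.Dict.modify, PySem.Dict.mem_keys_insert, List.mem_cons]
      constructor
      · rintro (⟨h | h⟩ | h)
        · exact Or.inr ⟨by omega, by omega, p, Or.inl rfl, by omega⟩
        · exact Or.inl h
        · exact Or.inr ⟨h.1, h.2.1, h.2.2.choose, Or.inr h.2.2.choose_spec.1, h.2.2.choose_spec.2⟩
      · rintro (h | ⟨h0, hm, q, hq | hq, hv⟩)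
        · exact Or.inl (Or.inr h)
        · subst hq; exact Or.inl (Or.inl (by omega))
        · exact Or.inr ⟨h0, hm, q, hq, hv⟩
    · have hstep : (p :: rest).foldl (stepB m) d = rest.foldl (stepB m) d := by
        have : (decide (1 ≤ p.2) && decide (p.2 ≤ m)) = false := by
          simp only [Bool.and_eq_false_iff, decide_eq_false_iff_not]; omega
        simp [stepB, this]
      rw [hstep, ih]
      constructor
      · rintro (h | ⟨h0, hm, q, hq, hv⟩)
        · exact Or.inl h
        · exact Or.inr ⟨h0, hm, q, List.mem_cons_of_mem _ hq, hv⟩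
      · rintro (h | ⟨h0, hm, q, hq, hv⟩)
        · exact Or.inl h
        · rcases List.mem_cons.mp hq with hq | hq
          · subst hq; omega
          · exact Or.inr ⟨h0, hm, q, hq, hv⟩

theorem bucket_nodup_keys (td : List (Int × Int)) (m : Int) (d : PySem.Dict Int (List Int))
    (hnd : d.keys.Nodup) : (td.foldl (stepB m) d).keys.Nodup := by
  induction td generalizing d with
  | nil => exact hnd
  | cons p rest ih =>
    rw [List.foldl_cons]
    refine ih _ ?_
    unfold stepB
    split
    · exact PySem.Dict.nodup_keys_insert _ _ _ hnd
    · exact hnd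

-- kAt nonempty ↔ some item has that value
theorem kAt_ne_nil_iff (td : List (Int × Int)) (l : Int) :
    kAt td l ≠ [] ↔ ∃ p ∈ td, p.2 = l + 1 := by
  simp [kAt, List.filter_eq_nil_iff]

-- the sorted occupied-level key list of B's buckets is the ascending filter of range(max_lvl)
theorem sorted_bucket_keys (td : List (Int × Int)) (m : Int) :
    PySem.List.sorted (td.foldl (stepB m) PySem.Dict.empty).keys (fun x => x) false =
      (PySem.List.pyRange 0 m 1).filter (fun l => !decide (kAt td l = [])) := by
  apply PySem.List.sorted_eq_of_perm_of_pairwise_lt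
  · rw [List.perm_ext_iff_of_nodup
      ((PySem.List.nodup_pyRange_one 0 m).filter _)
      (bucket_nodup_keys td m PySem.Dict.empty PySem.Dict.nodup_keys_empty)]
    intro l
    rw [List.mem_filter, PySem.List.mem_pyRange_one, bucket_mem_keys]
    simp only [PySem.Dict.keys_empty, List.not_mem_nil, false_or,
      Bool.not_eq_eq_eq_not, Bool.not_true, decide_eq_false_iff_not, ← kAt_ne_nil_iff]
    tauto
  · exact List.Pairwise.filter _ (PySem.List.pairwise_lt_pyRange_one 0 m)

-- ===== VERDICT (by name: the statement is the Claim_ definition above) =====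
theorem get_level_nodes_spec : Claim_equal_get_level_nodes := by
  intro td m _
  unfold Spec_get_level_nodes get_level_nodes get_level_nodes_alt
  have hA := outer_fold td (PySem.List.pyRange 0 m 1) PySem.Dict.empty
    (PySem.List.nodup_pyRange_one 0 m) PySem.Dict.nodup_keys_empty
    (by intro l _; simp [PySem.Dict.contains_empty])
  rw [show (fun (d : PySem.Dict Int (List Int)) (level : Int) => td.foldl
      (fun d p => if p.2 == level + 1 then d.modify level ([] : List Int) (fun xs => xs ++ [p.1]) else d) d)
      = (fun d lvl => innerF td lvl d) from rfl] at *
  rw [hA, filterMap_eq_map_filter _ (kAt td)]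
  show _ = (PySem.List.sorted (td.foldl (stepB m) PySem.Dict.empty).keys (fun x => x) false).map
      (fun lvl => (lvl, (td.foldl (stepB m) PySem.Dict.empty).getD lvl []))
  rw [sorted_bucket_keys td m]
  simp only [show (PySem.Dict.empty : PySem.Dict Int (List Int)).items = [] from rfl, List.nil_append]
  refine List.map_congr_left ?_
  intro l hl
  have hr : 0 ≤ l ∧ l < m := by
    have := (List.mem_filter.mp hl).1
    exact (PySem.List.mem_pyRange_one.mp this).imp id id
  rw [bucket_getD td m l PySem.Dict.empty]
  simp [hr]
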